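-- pv_equiv track=rewrite | github.com/M-Song-ChE/echem-gui | echem_core/file_manager.py | _default_ycol
-- ===== SOURCE A (Python) =====
-- def _is_voltage_col(c):
--     lo = c.lower()
--     return ("ewe" in lo or "ece" in lo or "potential" in lo or "voltage" in lo
--             or lo.startswith("e/")
--             or (lo.endswith("/v") and not lo.endswith(("mv", "µv", "nv"))))
--
-- def _is_current_col(c):
--     lo = c.lower()
--     return (lo.startswith("i/") or "i/ma" in lo or "i/a" in lo
--             or "i/µa" in lo or "current" in lo)
--
-- def _is_impedance_col(c):
--     lo = c.lower()
--     return ("re(z)" in lo or "im(z)" in lo or lo.startswith("freq/")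
--             or "|z|" in lo or "phase(z)" in lo)
--
-- def _default_ycol(cols, x_col=""):
--     """Return the best Y column based on detected data type (EIS / OCV / CV)."""
--     has_impedance = any(_is_impedance_col(c) for c in cols)
--     has_current   = any(_is_current_col(c)   for c in cols)
--
--     # EIS data: prefer -Im(Z) on Y axis
--     if has_impedance:
--         for c in cols:
--             if c == x_col:
--                 continue
--             if "-im(z)" in c.lower():
--                 return c
--         for c in cols:
--             if c != x_col and _is_impedance_col(c):
--                 return c
--
--     # CV / LSV: current on Y
--     if has_current:
--         for c in cols:
--             if c == x_col:
--                 continue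
--             if _is_current_col(c):
--                 return c
--
--     # OCV / time-series: voltage on Y (X is time)
--     for c in cols:
--         if c == x_col:
--             continue
--         if _is_voltage_col(c):
--             return c
--
--     # Final fallback: first column that differs from x_col
--     for c in cols:
--         if c != x_col:
--             return c
--     return cols[0]
-- ===== SOURCE B (Python) =====
-- def _default_ycol(cols, x_col=""):
--     """Pick the best Y column: one scoring pass + argmin instead of five sequential scans."""
--     def _rank(c):
--         lo = c.lower()
--         if "-im(z)" in lo:
--             return 0
--         if ("re(z)" in lo or "im(z)" in lo or lo.startswith("freq/")
--                 or "|z|" in lo or "phase(z)" in lo):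
--             return 1
--         if (lo.startswith("i/") or "i/ma" in lo or "i/a" in lo
--                 or "i/µa" in lo or "current" in lo):
--             return 2
--         if ("ewe" in lo or "ece" in lo or "potential" in lo or "voltage" in lo
--                 or lo.startswith("e/")
--                 or (lo.endswith("/v") and not lo.endswith(("mv", "µv", "nv")))):
--             return 3
--         return 4
--     cand = [c for c in cols if c != x_col]
--     if not cand:
--         return cols[0]
--     return min(cand, key=_rank)
-- ===== Notes on version B (the rewrite author's own statement) =====
-- stated objective: alternative
-- what changed: Replaces A's five sequential prioritized early-return scans (gated by has_impedance/has_current flags) with a single per-column rank function (0..4) plus one first-minimum selection over the columns differing from x_col, ties broken by first position.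
-- outside the precondition, e.g. on _default_ycol([], ''): A raises IndexError, B raises IndexError
import Mathlib
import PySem

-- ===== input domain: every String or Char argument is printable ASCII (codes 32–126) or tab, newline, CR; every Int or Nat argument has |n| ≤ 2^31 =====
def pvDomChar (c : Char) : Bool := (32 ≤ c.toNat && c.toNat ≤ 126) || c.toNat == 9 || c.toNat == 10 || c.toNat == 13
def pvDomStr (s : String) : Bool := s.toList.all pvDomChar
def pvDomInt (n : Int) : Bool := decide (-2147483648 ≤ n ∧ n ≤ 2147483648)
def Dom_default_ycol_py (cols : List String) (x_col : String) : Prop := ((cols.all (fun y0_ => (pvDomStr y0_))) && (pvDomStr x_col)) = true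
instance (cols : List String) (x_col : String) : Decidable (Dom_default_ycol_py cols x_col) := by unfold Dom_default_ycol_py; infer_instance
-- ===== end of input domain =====

-- B replaces A's five sequential prioritized scans with one per-column rank (0..4) plus a single
-- first-minimum selection over the columns differing from x_col (objective: alternative decomposition).

-- ===== PORT A =====
def isVoltageCol (c : String) : Bool :=
  let lo := PySem.Str.lower c
  PySem.Str.isIn "ewe" lo || PySem.Str.isIn "ece" lo || PySem.Str.isIn "potential" lo ||
    PySem.Str.isIn "voltage" lo || PySem.Str.startswith lo "e/" ||
    (PySem.Str.endswith lo "/v" &&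
      !(PySem.Str.endswith lo "mv" || PySem.Str.endswith lo "µv" || PySem.Str.endswith lo "nv"))

def isCurrentCol (c : String) : Bool :=
  let lo := PySem.Str.lower c
  PySem.Str.startswith lo "i/" || PySem.Str.isIn "i/ma" lo || PySem.Str.isIn "i/a" lo ||
    PySem.Str.isIn "i/µa" lo || PySem.Str.isIn "current" lo

def isImpedanceCol (c : String) : Bool :=
  let lo := PySem.Str.lower c
  PySem.Str.isIn "re(z)" lo || PySem.Str.isIn "im(z)" lo || PySem.Str.startswith lo "freq/" ||
    PySem.Str.isIn "|z|" lo || PySem.Str.isIn "phase(z)" lo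

def default_ycol_py (cols : List String) (x_col : String) : String :=
  let hasImpedance := cols.any (fun c => isImpedanceCol c)
  let hasCurrent := cols.any (fun c => isCurrentCol c)
  -- EIS data: prefer -Im(Z) on Y axis (each early-return 'for' loop is a List.find?)
  match (if hasImpedance then
           cols.find? (fun c => c != x_col && PySem.Str.isIn "-im(z)" (PySem.Str.lower c))
         else none) with
  | some c => c
  | none =>
    match (if hasImpedance then cols.find? (fun c => c != x_col && isImpedanceCol c) else none) with
    | some c => c
    | none =>
      -- CV / LSV: current on Y
      match (if hasCurrent then cols.find? (fun c => c != x_col && isCurrentCol c) else none) with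
      | some c => c
      | none =>
        -- OCV / time-series: voltage on Y
        match cols.find? (fun c => c != x_col && isVoltageCol c) with
        | some c => c
        | none =>
          -- final fallback: first column that differs from x_col, else cols[0]
          match cols.find? (fun c => c != x_col) with
          | some c => c
          | none => (PySem.List.pyGet? cols 0).getD ""   -- cols[0]; none (IndexError) excluded by Pre_

-- ===== PORT B =====
def rankCol (c : String) : Nat :=
  let lo := PySem.Str.lower c
  if PySem.Str.isIn "-im(z)" lo then 0
  else if PySem.Str.isIn "re(z)" lo || PySem.Str.isIn "im(z)" lo || PySem.Str.startswith lo "freq/" ||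
       PySem.Str.isIn "|z|" lo || PySem.Str.isIn "phase(z)" lo then 1
  else if PySem.Str.startswith lo "i/" || PySem.Str.isIn "i/ma" lo || PySem.Str.isIn "i/a" lo ||
       PySem.Str.isIn "i/µa" lo || PySem.Str.isIn "current" lo then 2
  else if PySem.Str.isIn "ewe" lo || PySem.Str.isIn "ece" lo || PySem.Str.isIn "potential" lo ||
       PySem.Str.isIn "voltage" lo || PySem.Str.startswith lo "e/" ||
       (PySem.Str.endswith lo "/v" &&
         !(PySem.Str.endswith lo "mv" || PySem.Str.endswith lo "µv" || PySem.Str.endswith lo "nv")) then 3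
  else 4

def default_ycol_py_alt (cols : List String) (x_col : String) : String :=
  let cand := cols.filter (fun c => c != x_col)
  match PySem.List.min? cand rankCol with
  | some c => c
  | none => (PySem.List.pyGet? cols 0).getD ""   -- cand empty: cols[0]; IndexError excluded by Pre_

-- ===== PRECONDITION & SPEC =====
-- Pre_ excludes only cols = [], on which the Python A (and B) raises IndexError at cols[0].
def Pre_default_ycol_py (cols : List String) (x_col : String) : Prop := cols ≠ []
instance (cols : List String) (x_col : String) : Decidable (Pre_default_ycol_py cols x_col) := by
  unfold Pre_default_ycol_py; infer_instance

def pvWitness_default_ycol_py : List String × String := (["Ewe/V", "time/s"], "time/s")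

def Spec_default_ycol_py (cols : List String) (x_col : String) (out : String) : Prop :=
  out = default_ycol_py_alt cols x_col
instance (cols : List String) (x_col : String) (out : String) :
    Decidable (Spec_default_ycol_py cols x_col out) := by unfold Spec_default_ycol_py; infer_instance

-- ===== CLAIM (what is proved, stated in full; the proofs are below) =====
def Claim_equal_default_ycol_py : Prop := ∀ (cols : List String) (x_col : String),
  Dom_default_ycol_py cols x_col → Pre_default_ycol_py cols x_col →
  Spec_default_ycol_py cols x_col (default_ycol_py cols x_col)

-- ===== LEMMAS AND PROOFS =====

-- "-im(z)" in lo entails "im(z)" in lo, hence impedance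
theorem impedance_of_neg_im (c : String)
    (h : PySem.Str.isIn "-im(z)" (PySem.Str.lower c) = true) : isImpedanceCol c = true := by
  have h1 : "-im(z)".toList <:+: (PySem.Str.lower c).toList := (PySem.Str.isIn_iff_infix _ _).mp h
  have h2 : "im(z)".toList <:+: (PySem.Str.lower c).toList :=
    List.IsInfix.trans (by decide) h1
  have h3 : PySem.Str.isIn "im(z)" (PySem.Str.lower c) = true := (PySem.Str.isIn_iff_infix _ _).mpr h2
  simp only [isImpedanceCol]
  simp at h3
  simp [h3]

theorem rank0_iff (c : String) :
    (rankCol c == 0) = PySem.Str.isIn "-im(z)" (PySem.Str.lower c) := by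
  simp only [rankCol]
  split_ifs <;> simp_all

theorem rank1_iff (c : String) (h0 : PySem.Str.isIn "-im(z)" (PySem.Str.lower c) = false) :
    (rankCol c == 1) = isImpedanceCol c := by
  simp only [rankCol, isImpedanceCol]
  split_ifs <;> simp_all

theorem rank2_iff (c : String) (hi : isImpedanceCol c = false) :
    (rankCol c == 2) = isCurrentCol c := by
  have h0 : PySem.Str.isIn "-im(z)" (PySem.Str.lower c) = false := by
    by_contra h
    rw [Bool.not_eq_false] at h
    rw [impedance_of_neg_im c h] at hi
    simp at hi
  simp only [isImpedanceCol] at hi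
  simp only [rankCol, isCurrentCol]
  split_ifs <;> simp_all

theorem rank3_iff (c : String) (hi : isImpedanceCol c = false) (hc : isCurrentCol c = false) :
    (rankCol c == 3) = isVoltageCol c := by
  have h0 : PySem.Str.isIn "-im(z)" (PySem.Str.lower c) = false := by
    by_contra h
    rw [Bool.not_eq_false] at h
    rw [impedance_of_neg_im c h] at hi
    simp at hi
  simp only [isImpedanceCol] at hi
  simp only [isCurrentCol] at hc
  simp only [rankCol, isVoltageCol]
  split_ifs <;> simp_all

theorem rank4_eq (c : String) (hi : isImpedanceCol c = false) (hc : isCurrentCol c = false)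
    (hv : isVoltageCol c = false) : rankCol c = 4 := by
  have h0 : PySem.Str.isIn "-im(z)" (PySem.Str.lower c) = false := by
    by_contra h
    rw [Bool.not_eq_false] at h
    rw [impedance_of_neg_im c h] at hi
    simp at hi
  simp only [isImpedanceCol] at hi
  simp only [isCurrentCol] at hc
  simp only [isVoltageCol] at hv
  simp only [rankCol]
  split_ifs <;> simp_all

theorem rank_ge1 (c : String) (h0 : PySem.Str.isIn "-im(z)" (PySem.Str.lower c) = false) :
    1 ≤ rankCol c := by
  simp only [rankCol]
  split_ifs <;> simp_all

theorem rank_ge2 (c : String) (hi : isImpedanceCol c = false) : 2 ≤ rankCol c := by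
  have h0 : PySem.Str.isIn "-im(z)" (PySem.Str.lower c) = false := by
    by_contra h
    rw [Bool.not_eq_false] at h
    rw [impedance_of_neg_im c h] at hi
    simp at hi
  simp only [isImpedanceCol] at hi
  simp only [rankCol]
  split_ifs <;> simp_all

theorem rank_ge3 (c : String) (hi : isImpedanceCol c = false) (hc : isCurrentCol c = false) :
    3 ≤ rankCol c := by
  have h0 : PySem.Str.isIn "-im(z)" (PySem.Str.lower c) = false := by
    by_contra h
    rw [Bool.not_eq_false] at h
    rw [impedance_of_neg_im c h] at hi
    simp at hi
  simp only [isImpedanceCol] at hi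
  simp only [isCurrentCol] at hc
  simp only [rankCol]
  split_ifs <;> simp_all

-- A's 'for c in cols: if c != x_col and p(c)' over cols is find? p over the filtered candidates
theorem find?_filter_and (l : List String) (x : String) (p : String → Bool) :
    (l.filter (fun c => c != x)).find? p = l.find? (fun c => (c != x) && p c) := by
  induction l with
  | nil => rfl
  | cons c t ih =>
    by_cases hc : (c != x) = true <;> by_cases hp : p c = true <;>
      simp [List.filter_cons, List.find?_cons, hc, hp, ih]

theorem find?_congr_mem {α : Type} (l : List α) (p q : α → Bool) (h : ∀ y ∈ l, p y = q y) :
    l.find? p = l.find? q := by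
  induction l with
  | nil => rfl
  | cons c t ih =>
    have hc := h c (by simp)
    by_cases hp : p c = true <;>
      simp_all [List.find?_cons, ih (fun y hy => h y (by simp [hy]))]

-- PySem.List.min? of a nonempty list is the plain running first-minimum fold seeded with the head
theorem min?_cons (t : List String) : ∀ (x : String),
    PySem.List.min? (x :: t) rankCol =
      some (t.foldl (fun b y => if rankCol y < rankCol b then y else b) x) := by
  induction t with
  | nil => intro x; simp [PySem.List.min?]
  | cons y t ih =>
    intro x
    have key : PySem.List.min? (x :: y :: t) rankCol =
        PySem.List.min? ((if rankCol y < rankCol x then y else x) :: t) rankCol := by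
      by_cases h : rankCol y < rankCol x <;> simp [PySem.List.min?, h]
    rw [key, ih]
    simp only [List.foldl_cons]

-- the running first-minimum fold stays put when nothing strictly smaller follows
theorem fold_find (k : Nat) (l : List String) : ∀ (x c : String),
    k ≤ rankCol x → (∀ y ∈ l, k ≤ rankCol y) →
    (if rankCol x == k then some x else l.find? (fun y => rankCol y == k)) = some c →
    l.foldl (fun b y => if rankCol y < rankCol b then y else b) x = c := by
  induction l with
  | nil =>
    intro x c hx _ hfind
    by_cases h : (rankCol x == k) = true <;> simp [h] at hfind
    simpa using hfind
  | cons y t ih =>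
    intro x c hx hlow hfind
    have hy : k ≤ rankCol y := hlow y (by simp)
    have hlow' : ∀ z ∈ t, k ≤ rankCol z := fun z hz => hlow z (by simp [hz])
    simp only [List.foldl_cons]
    by_cases hxk : (rankCol x == k) = true
    · -- head x already attains the minimum level k: c = x and the fold keeps x
      have hcx : c = x := by simp [hxk] at hfind; exact hfind.symm
      have hxe : rankCol x = k := by simpa only [beq_iff_eq] using hxk
      have hpick : (if rankCol y < rankCol x then y else x) = x := by
        have : ¬ rankCol y < rankCol x := by omega
        simp [this]
      rw [hpick, hcx]
      apply ih x x hx hlow'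
      simp [hxk]
    · have hne : rankCol x ≠ k := fun he => hxk (by simp only [beq_iff_eq]; exact he)
      have hxgt : k < rankCol x := by omega
      simp only [hxk, Bool.false_eq_true, if_false] at hfind
      rw [List.find?_cons] at hfind
      by_cases hyk : (rankCol y == k) = true
      · have hcy : c = y := by simp [hyk] at hfind; exact hfind.symm
        have hye : rankCol y = k := by simpa only [beq_iff_eq] using hyk
        have hpick : (if rankCol y < rankCol x then y else x) = y := by
          have : rankCol y < rankCol x := by omega
          simp [this]
        rw [hpick, hcy]
        apply ih y y hy hlow'
        simp [hyk]
      · simp only [hyk, Bool.false_eq_true, if_false] at hfind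
        by_cases hpick : rankCol y < rankCol x
        · simp only [hpick, if_true]
          apply ih y c hy hlow'
          simp [hyk, hfind]
        · simp only [hpick, if_false]
          apply ih x c hx hlow'
          simp [hxk, hfind]

set_option maxHeartbeats 1000000 in
theorem min?_find (l : List String) (c : String) (k : Nat)
    (hlow : ∀ y ∈ l, k ≤ rankCol y)
    (hfind : l.find? (fun y => rankCol y == k) = some c) :
    PySem.List.min? l rankCol = some c := by
  cases l with
  | nil => simp at hfind
  | cons x t =>
    rw [min?_cons t x]
    have hfind' : (if (rankCol x == k) = true then some x
        else t.find? (fun y => rankCol y == k)) = some c := by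
      rw [List.find?_cons] at hfind
      by_cases h : (rankCol x == k) = true
      · rw [if_pos h]
        simpa [h] using hfind
      · rw [if_neg h]
        have hb : (rankCol x == k) = false := by simpa using h
        simpa [hb] using hfind
    have hfx : k ≤ rankCol x := hlow x (List.mem_cons_self)
    have hlt : ∀ y ∈ t, k ≤ rankCol y := fun y hy => hlow y (List.mem_cons_of_mem x hy)
    rw [fold_find k t x c hfx hlt hfind']


-- voltage-and-below stage: on a list with no impedance and no current columns
theorem tail_from_volt (l : List String) (d : String)
    (hIall : ∀ y ∈ l, isImpedanceCol y = false)
    (hCall : ∀ y ∈ l, isCurrentCol y = false) :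
    (match l.find? (fun c => isVoltageCol c) with
     | some c => c
     | none =>
       match l.find? (fun _ => true) with
       | some c => c
       | none => d) =
    (match PySem.List.min? l rankCol with
     | some c => c
     | none => d) := by
  cases hv : l.find? (fun c => isVoltageCol c) with
  | some c =>
    have hfind' : l.find? (fun y => rankCol y == 3) = some c := by
      rw [find?_congr_mem l _ _ (fun y hy => rank3_iff y (hIall y hy) (hCall y hy))]
      exact hv
    rw [min?_find l c 3 (fun y hy => rank_ge3 y (hIall y hy) (hCall y hy)) hfind']
  | none =>
    have hVall : ∀ y ∈ l, isVoltageCol y = false := by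
      intro y hy
      have := List.find?_eq_none.mp hv y hy
      simpa using this
    cases ht : l.find? (fun _ => true) with
    | some c =>
      have hfind' : l.find? (fun y => rankCol y == 4) = some c := by
        rw [find?_congr_mem l (fun y => rankCol y == 4) (fun _ => true)
          (fun y hy => by simp [rank4_eq y (hIall y hy) (hCall y hy) (hVall y hy)])]
        exact ht
      rw [min?_find l c 4
        (fun y hy => by rw [rank4_eq y (hIall y hy) (hCall y hy) (hVall y hy)]) hfind']
    | none =>
      have hnil : l = [] := by
        cases l with
        | nil => rfl
        | cons a t => simp [List.find?] at ht
      subst hnil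
      simp [PySem.List.min?]

-- current-and-below stage: on a candidate list with no impedance columns
theorem tail_from_cur (cols l : List String) (d : String)
    (hsub : ∀ y ∈ l, y ∈ cols)
    (hIall : ∀ y ∈ l, isImpedanceCol y = false) :
    (match (if (cols.any fun c => isCurrentCol c) = true
            then l.find? (fun c => isCurrentCol c) else none) with
     | some c => c
     | none =>
       match l.find? (fun c => isVoltageCol c) with
       | some c => c
       | none =>
         match l.find? (fun _ => true) with
         | some c => c
         | none => d) =
    (match PySem.List.min? l rankCol with
     | some c => c
     | none => d) := by
  by_cases hCur : (cols.any fun c => isCurrentCol c) = true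
  · rw [if_pos hCur]
    cases hc : l.find? (fun c => isCurrentCol c) with
    | some c =>
      have hfind' : l.find? (fun y => rankCol y == 2) = some c := by
        rw [find?_congr_mem l _ _ (fun y hy => rank2_iff y (hIall y hy))]
        exact hc
      rw [min?_find l c 2 (fun y hy => rank_ge2 y (hIall y hy)) hfind']
    | none =>
      have hCall : ∀ y ∈ l, isCurrentCol y = false := by
        intro y hy
        have := List.find?_eq_none.mp hc y hy
        simpa using this
      exact tail_from_volt l d hIall hCall
  · rw [if_neg hCur]
    rw [Bool.not_eq_true] at hCur
    have hCall : ∀ y ∈ l, isCurrentCol y = false := by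
      intro y hy
      have := List.any_eq_false.mp hCur y (hsub y hy)
      simpa using this
    exact tail_from_volt l d hIall hCall

-- ===== VERDICT (by name: the statement is the Claim_ definition above) =====
theorem default_ycol_py_spec : Claim_equal_default_ycol_py := by
  intro cols x_col _ _
  show default_ycol_py cols x_col = default_ycol_py_alt cols x_col
  rw [default_ycol_py, default_ycol_py_alt]
  rw [← find?_filter_and cols x_col (fun c => PySem.Str.isIn "-im(z)" (PySem.Str.lower c)),
      ← find?_filter_and cols x_col (fun c => isImpedanceCol c),
      ← find?_filter_and cols x_col (fun c => isCurrentCol c),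
      ← find?_filter_and cols x_col (fun c => isVoltageCol c)]
  have hfilter4 : cols.find? (fun c => c != x_col) =
      (cols.filter (fun c => c != x_col)).find? (fun _ => true) := by
    rw [find?_filter_and cols x_col (fun _ => true)]
    exact find?_congr_mem cols _ _ (by intro y _; simp)
  rw [hfilter4]
  set l := cols.filter (fun c => c != x_col) with hl
  have hsub : ∀ y ∈ l, y ∈ cols := by
    intro y hy
    rw [hl] at hy
    exact (List.mem_filter.mp hy).1
  by_cases hImp : (cols.any fun c => isImpedanceCol c) = true
  · rw [if_pos hImp, if_pos hImp]
    cases h0 : l.find? (fun c => PySem.Str.isIn "-im(z)" (PySem.Str.lower c)) with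
    | some c =>
      have hfind' : l.find? (fun y => rankCol y == 0) = some c := by
        rw [find?_congr_mem l _ _ (fun y _ => rank0_iff y)]
        exact h0
      rw [min?_find l c 0 (fun y _ => Nat.zero_le _) hfind']
    | none =>
      have h0all : ∀ y ∈ l, PySem.Str.isIn "-im(z)" (PySem.Str.lower y) = false := by
        intro y hy
        have := List.find?_eq_none.mp h0 y hy
        simpa using this
      cases h1 : l.find? (fun c => isImpedanceCol c) with
      | some c =>
        have hfind' : l.find? (fun y => rankCol y == 1) = some c := by
          rw [find?_congr_mem l _ _ (fun y hy => rank1_iff y (h0all y hy))]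
          exact h1
        rw [min?_find l c 1 (fun y hy => rank_ge1 y (h0all y hy)) hfind']
      | none =>
        have hIall : ∀ y ∈ l, isImpedanceCol y = false := by
          intro y hy
          have := List.find?_eq_none.mp h1 y hy
          simpa using this
        exact tail_from_cur cols l _ hsub hIall
  · rw [if_neg hImp, if_neg hImp]
    rw [Bool.not_eq_true] at hImp
    have hIall : ∀ y ∈ l, isImpedanceCol y = false := by
      intro y hy
      have := List.any_eq_false.mp hImp y (hsub y hy)
      simpa using this
    exact tail_from_cur cols l _ hsub hIall
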